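-- pv_equiv track=rewrite | github.com/InnaVays/song-for-jane | app/nodes/poem_writer.py | check_rhyme_scheme
-- ===== SOURCE A (Python) =====
-- def _simple_last_word(line: str) -> str:
--     line = line.strip().lower()
--     parts = [p for p in line.split() if p]
--     return parts[-1] if parts else ""
--
-- def _ends_rhyme(a: str, b: str) -> bool:
--     a, b = a[-3:], b[-3:]
--     if not a or not b:
--         return True
--     return a == b or a[-2:] == b[-2:]
--
-- def check_rhyme_scheme(text: str, scheme: str) -> bool:
--     lines = [l for l in (s.strip() for s in text.splitlines()) if l]
--     if len(lines) < 4: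
--         return True
--     ends = [_simple_last_word(l) for l in lines[:4]]
--     scheme = (scheme or "ABAB").upper()
--     if scheme == "ABAB":
--         return _ends_rhyme(ends[0], ends[2]) and _ends_rhyme(ends[1], ends[3])
--     if scheme == "AABB":
--         return _ends_rhyme(ends[0], ends[1]) and _ends_rhyme(ends[2], ends[3])
--     if scheme == "ABBA":
--         return _ends_rhyme(ends[0], ends[3]) and _ends_rhyme(ends[1], ends[2])
--
--     return True
-- ===== SOURCE B (Python) =====
-- _SUPPORTED = {"ABAB", "AABB", "ABBA"}
--
-- def _simple_last_word(line: str) -> str: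
--     line = line.strip().lower()
--     parts = [p for p in line.split() if p]
--     return parts[-1] if parts else ""
--
-- def _ends_rhyme(a: str, b: str) -> bool:
--     a, b = a[-3:], b[-3:]
--     if not a or not b:
--         return True
--     return a == b or a[-2:] == b[-2:]
--
-- def check_rhyme_scheme(text: str, scheme: str) -> bool:
--     lines = [l for l in (s.strip() for s in text.splitlines()) if l]
--     if len(lines) < 4:
--         return True
--     ends = [_simple_last_word(l) for l in lines[:4]]
--     scheme = (scheme or "ABAB").upper()
--     if scheme not in _SUPPORTED:
--         return True
--     groups = {}
--     for i, letter in enumerate(scheme):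
--         groups[letter] = groups.get(letter, []) + [i]
--     return all(
--         _ends_rhyme(ends[i], ends[j])
--         for idxs in groups.values()
--         for i, j in zip(idxs, idxs[1:])
--     )
-- ===== Notes on version B (the rewrite author's own statement) =====
-- stated objective: alternative
-- what changed: Replaces the three hardcoded scheme branches with a computed grouping: a dict maps each scheme letter to its positions, and rhyme is checked on adjacent positions within each group.
import Mathlib
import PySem

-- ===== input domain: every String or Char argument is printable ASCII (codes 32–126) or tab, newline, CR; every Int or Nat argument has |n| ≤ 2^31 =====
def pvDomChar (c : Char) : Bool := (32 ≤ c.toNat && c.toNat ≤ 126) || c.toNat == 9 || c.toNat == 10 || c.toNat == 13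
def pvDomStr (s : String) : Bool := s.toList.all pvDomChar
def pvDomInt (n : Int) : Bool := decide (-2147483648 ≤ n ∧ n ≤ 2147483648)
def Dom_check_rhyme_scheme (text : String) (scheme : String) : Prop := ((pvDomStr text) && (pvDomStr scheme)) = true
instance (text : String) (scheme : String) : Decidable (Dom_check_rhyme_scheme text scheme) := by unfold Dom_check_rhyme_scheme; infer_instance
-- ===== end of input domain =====

-- B replaces A's three hardcoded scheme branches with a computed letter→positions grouping; objective: alternative (same cost).


-- ===== PORT A =====
-- shared helper _simple_last_word (identical source in Source A and Source B)
def pvSimpleLastWord (line : String) : String :=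
  let line := PySem.Str.lower (PySem.Str.strip line)
  let parts := (PySem.Str.split₀ line).filter (fun p => p ≠ "")
  if parts ≠ [] then (PySem.List.pyGet? parts (-1)).getD "" else ""

-- shared helper _ends_rhyme (identical source in Source A and Source B)
def pvEndsRhyme (a : String) (b : String) : Bool :=
  let a := PySem.Str.slice a (some (-3)) none
  let b := PySem.Str.slice b (some (-3)) none
  if a = "" || b = "" then true
  else a = b || PySem.Str.slice a (some (-2)) none = PySem.Str.slice b (some (-2)) none

def check_rhyme_scheme (text : String) (scheme : String) : Bool :=
  let lines := ((PySem.Str.splitlines text).map PySem.Str.strip).filter (fun l => l ≠ "")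
  if lines.length < 4 then true
  else
    let ends := (PySem.List.slice lines none (some 4)).map pvSimpleLastWord
    let scheme := PySem.Str.upper (if scheme = "" then "ABAB" else scheme)
    if scheme = "ABAB" then
      pvEndsRhyme ((PySem.List.pyGet? ends 0).getD "") ((PySem.List.pyGet? ends 2).getD "") &&
      pvEndsRhyme ((PySem.List.pyGet? ends 1).getD "") ((PySem.List.pyGet? ends 3).getD "")
    else if scheme = "AABB" then
      pvEndsRhyme ((PySem.List.pyGet? ends 0).getD "") ((PySem.List.pyGet? ends 1).getD "") &&
      pvEndsRhyme ((PySem.List.pyGet? ends 2).getD "") ((PySem.List.pyGet? ends 3).getD "")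
    else if scheme = "ABBA" then
      pvEndsRhyme ((PySem.List.pyGet? ends 0).getD "") ((PySem.List.pyGet? ends 3).getD "") &&
      pvEndsRhyme ((PySem.List.pyGet? ends 1).getD "") ((PySem.List.pyGet? ends 2).getD "")
    else true

-- ===== PORT B =====
def check_rhyme_scheme_alt (text : String) (scheme : String) : Bool :=
  let lines := ((PySem.Str.splitlines text).map PySem.Str.strip).filter (fun l => l ≠ "")
  if lines.length < 4 then true
  else
    let ends := (PySem.List.slice lines none (some 4)).map pvSimpleLastWord
    let scheme := PySem.Str.upper (if scheme = "" then "ABAB" else scheme)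
    if ¬ (PySem.Set.ofList ["ABAB", "AABB", "ABBA"]).contains scheme then true
    else
      let groups : PySem.Dict Char (List Int) :=
        (PySem.List.enumerate scheme.toList 0).foldl
          (fun g p => g.modify p.2 [] (fun l => l ++ [p.1])) PySem.Dict.empty
      groups.values.all (fun idxs =>
        (idxs.zip idxs.tail).all (fun ij =>
          pvEndsRhyme ((PySem.List.pyGet? ends ij.1).getD "") ((PySem.List.pyGet? ends ij.2).getD "")))

-- ===== PRECONDITION & SPEC =====
def Spec_check_rhyme_scheme (text : String) (scheme : String) (out : Bool) : Prop := out = check_rhyme_scheme_alt text scheme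
instance (text : String) (scheme : String) (out : Bool) : Decidable (Spec_check_rhyme_scheme text scheme out) := by unfold Spec_check_rhyme_scheme; infer_instance

-- ===== CLAIM (what is proved, stated in full; the proofs are below) =====
def Claim_equal_check_rhyme_scheme : Prop := ∀ (text : String) (scheme : String), Dom_check_rhyme_scheme text scheme → Spec_check_rhyme_scheme text scheme (check_rhyme_scheme text scheme)

-- ===== LEMMAS AND PROOFS =====

-- ===== VERDICT (by name: the statement is the Claim_ definition above) =====
theorem check_rhyme_scheme_spec : Claim_equal_check_rhyme_scheme := by
  intro text scheme _
  unfold Spec_check_rhyme_scheme check_rhyme_scheme check_rhyme_scheme_alt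
  set lines := ((PySem.Str.splitlines text).map PySem.Str.strip).filter (fun l => l ≠ "") with hl
  by_cases h4 : lines.length < 4
  · simp [h4]
  · simp only [h4, if_false]
    set ends := (PySem.List.slice lines none (some 4)).map pvSimpleLastWord with he
    generalize PySem.Str.upper (if scheme = "" then "ABAB" else scheme) = sch
    by_cases h1 : sch = "ABAB"
    · subst h1; simp [PySem.List.enumerate, PySem.Dict.modify, PySem.Dict.empty,
        PySem.Dict.values, PySem.Set.ofList, PySem.Set.contains, PySem.Set.add, List.all,
        PySem.Dict.insert, PySem.Dict.getD, PySem.Dict.get?, PySem.Dict.contains]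
    · by_cases h2 : sch = "AABB"
      · subst h2; simp [PySem.List.enumerate, PySem.Dict.modify, PySem.Dict.empty,
          PySem.Dict.values, PySem.Set.ofList, PySem.Set.contains, PySem.Set.add, List.all,
          PySem.Dict.insert, PySem.Dict.getD, PySem.Dict.get?, PySem.Dict.contains]
      · by_cases h3 : sch = "ABBA"
        · subst h3; simp [PySem.List.enumerate, PySem.Dict.modify, PySem.Dict.empty,
            PySem.Dict.values, PySem.Set.ofList, PySem.Set.contains, PySem.Set.add, List.all,
            PySem.Dict.insert, PySem.Dict.getD, PySem.Dict.get?, PySem.Dict.contains]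
        · simp [h1, h2, h3, PySem.Set.ofList, PySem.Set.contains, PySem.Set.add]
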